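-- pv_equiv track=rewrite | github.com/joetache4/project-euler | lib/num.py | mod_inverse_arr
-- ===== SOURCE A (Python) =====
-- def mod_inverse_arr(arr, mod):
-- 	'''Calculate the modular inverse for a list of numbers.'''
-- 	# calc prefix products
-- 	inv = [0] * len(arr)
-- 	c = 1
-- 	for i in range(len(arr)):
-- 		inv[i] = c
-- 		c = c * arr[i] % mod
-- 	# inverse of the product of all nums
-- 	c = pow(inv[-1]*arr[-1], -1, mod)
-- 	# calc suffix products
-- 	for i in range(len(arr)-1, -1, -1):
-- 		inv[i] = c * inv[i] % mod
-- 		c = c * arr[i] % mod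
-- 	return inv
-- ===== SOURCE B (Python) =====
-- def mod_inverse_arr(arr, mod):
-- 	'''Calculate the modular inverse for a list of numbers.'''
-- 	return [pow(x, -1, mod) for x in arr]
-- ===== Notes on version B (the rewrite author's own statement) =====
-- stated objective: simpler
-- what changed: Replaces the prefix/suffix shared-product batch-inversion trick (two index loops over a mutable array plus one shared extended-gcd inversion) by a one-line comprehension that inverts each element independently with pow(x, -1, mod).
import Mathlib
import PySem

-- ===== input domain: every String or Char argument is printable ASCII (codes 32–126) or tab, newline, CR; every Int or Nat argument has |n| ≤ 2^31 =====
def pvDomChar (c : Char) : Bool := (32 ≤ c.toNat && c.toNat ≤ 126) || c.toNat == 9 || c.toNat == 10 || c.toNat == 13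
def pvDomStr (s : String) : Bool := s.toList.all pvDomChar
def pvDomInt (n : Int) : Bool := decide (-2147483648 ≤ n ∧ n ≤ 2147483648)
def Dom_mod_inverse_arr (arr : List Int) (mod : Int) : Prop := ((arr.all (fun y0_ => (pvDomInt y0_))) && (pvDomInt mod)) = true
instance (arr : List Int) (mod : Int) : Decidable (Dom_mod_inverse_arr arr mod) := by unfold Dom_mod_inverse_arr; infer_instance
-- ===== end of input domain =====

-- B replaces A's prefix/suffix shared-product batch inversion by a per-element pow(x, -1, mod): simpler, not faster.

-- exact port of Python's pow(x, -1, m) on the admitted inputs (m ≠ 0 and gcd(x, m) = 1, guaranteed by Pre_):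
-- the Bézout coefficient Int.gcdA x m is an inverse of x mod m, reduced by Python's %-semantics (PySem.Int.mod)
def pyInvMod (x m : Int) : Int := PySem.Int.mod (Int.gcdA x m) m

-- ===== PORT A =====
def mod_inverse_arr (arr : List Int) (mod : Int) : List Int :=
  let n : Int := (arr.length : Int)
  -- inv = [0]*len(arr); c = 1; for i in range(len(arr)): inv[i] = c; c = c*arr[i] % mod
  let s1 := (PySem.List.pyRange 0 n 1).foldl
    (fun (st : List Int × Int) i =>
      (PySem.List.pySetD st.1 i st.2,
       PySem.Int.mod (st.2 * PySem.List.pyGetD arr i 0) mod))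
    (List.replicate arr.length 0, 1)
  -- c = pow(inv[-1]*arr[-1], -1, mod)
  let c := pyInvMod (PySem.List.pyGetD s1.1 (-1) 0 * PySem.List.pyGetD arr (-1) 0) mod
  -- for i in range(len(arr)-1, -1, -1): inv[i] = c*inv[i] % mod; c = c*arr[i] % mod
  let s2 := (PySem.List.pyRange (n - 1) (-1) (-1)).foldl
    (fun (st : List Int × Int) i =>
      (PySem.List.pySetD st.1 i (PySem.Int.mod (st.2 * PySem.List.pyGetD st.1 i 0) mod),
       PySem.Int.mod (st.2 * PySem.List.pyGetD arr i 0) mod))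
    (s1.1, c)
  s2.1

-- ===== PORT B =====
def mod_inverse_arr_alt (arr : List Int) (mod : Int) : List Int :=
  arr.map (fun x => pyInvMod x mod)

-- ===== PRECONDITION & SPEC =====
-- Pre_ excludes exactly the inputs on which A raises: the empty list (IndexError at arr[-1]),
-- mod = 0 (ZeroDivisionError inside pow), and a non-invertible element (ValueError inside pow).
def Pre_mod_inverse_arr (arr : List Int) (mod : Int) : Prop :=
  arr ≠ [] ∧ mod ≠ 0 ∧ ∀ a ∈ arr, Int.gcd a mod = 1
instance (arr : List Int) (mod : Int) : Decidable (Pre_mod_inverse_arr arr mod) := by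
  unfold Pre_mod_inverse_arr; infer_instance
def pvWitness_mod_inverse_arr : List Int × Int := ([3, 4], 7)

def Spec_mod_inverse_arr (arr : List Int) (mod : Int) (out : List Int) : Prop :=
  out = mod_inverse_arr_alt arr mod
instance (arr : List Int) (mod : Int) (out : List Int) : Decidable (Spec_mod_inverse_arr arr mod out) := by
  unfold Spec_mod_inverse_arr; infer_instance

-- ===== CLAIM (what is proved, stated in full; the proofs are below) =====
def Claim_equal_mod_inverse_arr : Prop := ∀ (arr : List Int) (mod : Int), Dom_mod_inverse_arr arr mod → Pre_mod_inverse_arr arr mod → Spec_mod_inverse_arr arr mod (mod_inverse_arr arr mod)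

-- ===== LEMMAS AND PROOFS =====

-- c-sequence of A's first loop: cseq j is c before iteration j (stored in inv[j])
def cseq (arr : List Int) (m : Int) : Nat → Int
  | 0 => 1
  | j+1 => PySem.Int.mod (cseq arr m j * arr.getD j 0) m

-- c-sequence of A's second loop: useq t is c after its first t iterations (starting from c0)
def useq (arr : List Int) (m c0 : Int) : Nat → Int
  | 0 => c0
  | t+1 => PySem.Int.mod (useq arr m c0 t * arr.getD (arr.length - 1 - t) 0) m

-- Python % (Int.fmod) congruence toolbox ---------------------------------------

lemma fmod_modEq (a m : Int) : PySem.Int.mod a m ≡ a [ZMOD m] := by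
  rw [PySem.Int.mod.eq_1, Int.fmod_eq_emod]
  split_ifs with h
  · show (a % m + 0) % m = a % m
    rw [add_zero]
    exact Int.emod_emod_of_dvd a dvd_rfl
  · show (a % m + m) % m = a % m
    rw [Int.add_emod_right]
    exact Int.emod_emod_of_dvd a dvd_rfl

lemma fmod_congr {a b m : Int} (h : a ≡ b [ZMOD m]) :
    PySem.Int.mod a m = PySem.Int.mod b m := by
  rw [PySem.Int.mod.eq_1, PySem.Int.mod.eq_1, Int.fmod_eq_emod, Int.fmod_eq_emod]
  have he : a % m = b % m := h
  have hda : m ∣ a ↔ a % m = 0 := ⟨Int.emod_eq_zero_of_dvd, Int.dvd_of_emod_eq_zero⟩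
  have hdb : m ∣ b ↔ b % m = 0 := ⟨Int.emod_eq_zero_of_dvd, Int.dvd_of_emod_eq_zero⟩
  have hd : (m ∣ a) = (m ∣ b) := by rw [eq_iff_iff, hda, hdb, he]
  rw [he]
  congr 1
  simp only [hd]

lemma gcd_congr {x y m : Int} (h : x ≡ y [ZMOD m]) : Int.gcd x m = Int.gcd y m := by
  obtain ⟨k, hk⟩ := (Int.modEq_iff_dvd.mp h)
  have hx : x = y + m * (-k) := by linarith
  rw [hx]
  exact Int.gcd_add_mul_left_left m y (-k)

lemma bezout_inv {x m : Int} (h : Int.gcd x m = 1) : x * Int.gcdA x m ≡ 1 [ZMOD m] := by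
  have hb := Int.gcd_eq_gcd_ab x m
  rw [h] at hb
  exact (Int.modEq_iff_dvd.mpr ⟨-Int.gcdB x m, by push_cast at hb; linarith⟩).symm

lemma modeq_cancel {a x y m : Int} (h : Int.gcd a m = 1) (hxy : a * x ≡ a * y [ZMOD m]) :
    x ≡ y [ZMOD m] := by
  have hco : IsCoprime (m : Int) a := (Int.isCoprime_iff_gcd_eq_one.mpr h).symm
  obtain ⟨k, hk⟩ := Int.modEq_iff_dvd.mp hxy
  have : m ∣ a * (y - x) := ⟨k, by linarith⟩
  exact Int.modEq_iff_dvd.mpr (hco.dvd_of_dvd_mul_left this)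

lemma coprime_prod {m : Int} (l : List Int) (h : ∀ a ∈ l, Int.gcd a m = 1) :
    Int.gcd l.prod m = 1 := by
  induction l with
  | nil => simp [Int.gcd]
  | cons a t ih =>
    rw [List.prod_cons]
    have h1 : IsCoprime a m := Int.isCoprime_iff_gcd_eq_one.mpr (h a (by simp))
    have h2 : IsCoprime t.prod m := Int.isCoprime_iff_gcd_eq_one.mpr (ih fun b hb => h b (by simp [hb]))
    exact Int.isCoprime_iff_gcd_eq_one.mp (h1.mul_left h2)

lemma pyGetD_neg_one {α : Type} (xs : List α) (d : α) (h : 0 < xs.length) :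
    PySem.List.pyGetD xs (-1) d = xs[xs.length - 1]'(by omega) := by
  simp only [PySem.List.pyGetD, PySem.List.pyGet?, PySem.List.pyIdx?]
  norm_num
  rw [if_pos (by omega)]
  simp [List.getElem?_eq_getElem (by omega : xs.length - 1 < xs.length)]

-- loop characterisations -------------------------------------------------------

lemma loop1_eq (arr : List Int) (m : Int) (k : Nat) (hk : k ≤ arr.length) :
    ((List.range k).map (fun (j : Nat) => (j : Int))).foldl
      (fun (st : List Int × Int) i =>
        (PySem.List.pySetD st.1 i st.2,
         PySem.Int.mod (st.2 * PySem.List.pyGetD arr i 0) m))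
      (List.replicate arr.length 0, 1)
    = ((List.range arr.length).map (fun j => if j < k then cseq arr m j else 0),
       cseq arr m k) := by
  induction k with
  | zero =>
    simp only [List.range_zero, List.map_nil, List.foldl_nil]
    refine Prod.ext ?_ rfl
    apply List.ext_getElem (by simp)
    intro i h1 h2
    simp only [List.getElem_replicate, List.getElem_map, Nat.not_lt_zero, if_false]
  | succ k ih =>
    rw [List.range_succ]
    simp only [List.map_append, List.foldl_append, List.map_cons, List.map_nil,
      List.foldl_cons, List.foldl_nil]
    rw [ih (by omega)]
    have hkl : k < arr.length := by omega
    refine Prod.ext ?_ ?_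
    · rw [PySem.List.pySetD_natCast]
      apply List.ext_getElem (by simp)
      intro i h1 h2
      simp only [List.getElem_set, List.getElem_map, List.getElem_range]
      by_cases hik : k = i
      · subst hik
        simp
      · rw [if_neg hik]
        by_cases hlt : i < k
        · rw [if_pos hlt, if_pos (by omega)]
        · rw [if_neg hlt, if_neg (by omega)]
    · rw [PySem.List.pyGetD_of_nonneg arr 0 (by positivity), Int.toNat_natCast]
      rfl

lemma loop2_eq (arr : List Int) (m c0 : Int) (t : Nat) (ht : t ≤ arr.length) :
    ((List.range t).map (fun (k : Nat) => ((arr.length : Int) - 1 - k))).foldl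
      (fun (st : List Int × Int) i =>
        (PySem.List.pySetD st.1 i (PySem.Int.mod (st.2 * PySem.List.pyGetD st.1 i 0) m),
         PySem.Int.mod (st.2 * PySem.List.pyGetD arr i 0) m))
      ((List.range arr.length).map (cseq arr m ·), c0)
    = ((List.range arr.length).map
         (fun j => if arr.length - t ≤ j
                   then PySem.Int.mod (useq arr m c0 (arr.length - 1 - j) * cseq arr m j) m
                   else cseq arr m j),
       useq arr m c0 t) := by
  induction t with
  | zero =>
    simp only [List.range_zero, List.map_nil, List.foldl_nil, useq]
    refine Prod.ext ?_ rfl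
    apply List.ext_getElem (by simp)
    intro i h1 h2
    simp only [List.getElem_map, List.getElem_range]
    rw [if_neg (by simp at h1; omega)]
  | succ t ih =>
    rw [List.range_succ]
    simp only [List.map_append, List.foldl_append, List.map_cons, List.map_nil,
      List.foldl_cons, List.foldl_nil]
    rw [ih (by omega)]
    have htl : t < arr.length := by omega
    have hidx : ((arr.length : Int) - 1 - t) = ((arr.length - 1 - t : Nat) : Int) := by
      omega
    rw [hidx]
    have hgd : PySem.List.pyGetD
        ((List.range arr.length).map
          (fun j => if arr.length - t ≤ j
                    then PySem.Int.mod (useq arr m c0 (arr.length - 1 - j) * cseq arr m j) m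
                    else cseq arr m j))
        ((arr.length - 1 - t : Nat) : Int) 0
        = cseq arr m (arr.length - 1 - t) := by
      rw [PySem.List.pyGetD_of_nonneg _ 0 (by positivity), Int.toNat_natCast,
        List.getD_eq_getElem _ _ (by simp; omega)]
      simp only [List.getElem_map, List.getElem_range]
      rw [if_neg (by omega)]
    rw [hgd]
    refine Prod.ext ?_ ?_
    · rw [PySem.List.pySetD_natCast]
      apply List.ext_getElem (by simp)
      intro i h1 h2
      simp only [List.getElem_set, List.getElem_map, List.getElem_range]
      by_cases hik : arr.length - 1 - t = i
      · subst hik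
        rw [if_pos rfl, if_pos (by omega)]
        have he : arr.length - 1 - (arr.length - 1 - t) = t := by omega
        rw [he]
      · rw [if_neg hik]
        by_cases hge : arr.length - t ≤ i
        · rw [if_pos hge, if_pos (by omega)]
        · rw [if_neg hge, if_neg (by omega)]
    · show _ = useq arr m c0 (t+1)
      rw [useq]
      congr 1
      rw [PySem.List.pyGetD_of_nonneg arr 0 (by positivity), Int.toNat_natCast]

-- number-theoretic invariants --------------------------------------------------

lemma cseq_modEq (arr : List Int) (m : Int) (j : Nat) (hj : j ≤ arr.length) :
    cseq arr m j ≡ (arr.take j).prod [ZMOD m] := by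
  induction j with
  | zero => simp [cseq]
  | succ j ih =>
    have hjl : j < arr.length := by omega
    rw [cseq, List.prod_take_succ arr j hjl]
    refine (fmod_modEq _ m).trans ?_
    have hg : arr.getD j 0 = arr[j] := List.getD_eq_getElem arr 0 hjl
    rw [hg]
    exact Int.ModEq.mul_right _ (ih (by omega))

lemma useq_inv (arr : List Int) (m c0 : Int)
    (h0 : c0 * arr.prod ≡ 1 [ZMOD m]) (t : Nat) (ht : t ≤ arr.length) :
    useq arr m c0 t * (arr.take (arr.length - t)).prod ≡ 1 [ZMOD m] := by
  induction t with
  | zero =>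
    simpa [useq, List.take_length] using h0
  | succ t ih =>
    have htl : t < arr.length := by omega
    have hsplit : (arr.take (arr.length - t)).prod
        = (arr.take (arr.length - t - 1)).prod * arr[arr.length - t - 1]'(by omega) := by
      have h := List.prod_take_succ arr (arr.length - t - 1) (by omega)
      have he : arr.length - t - 1 + 1 = arr.length - t := by omega
      rw [he] at h
      exact h
    have hg : arr.getD (arr.length - 1 - t) 0 = arr[arr.length - t - 1]'(by omega) := by
      rw [List.getD_eq_getElem arr 0 (by omega : arr.length - 1 - t < arr.length)]
      congr 1
      omega
    have step : useq arr m c0 (t+1) * (arr.take (arr.length - (t+1))).prod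
        ≡ useq arr m c0 t * (arr.take (arr.length - t)).prod [ZMOD m] := by
      rw [useq, hg]
      have h1 : (arr.take (arr.length - (t+1))).prod = (arr.take (arr.length - t - 1)).prod := rfl
      calc PySem.Int.mod (useq arr m c0 t * arr[arr.length - t - 1]'(by omega)) m
              * (arr.take (arr.length - (t+1))).prod
          ≡ useq arr m c0 t * arr[arr.length - t - 1]'(by omega)
              * (arr.take (arr.length - (t+1))).prod [ZMOD m] :=
            Int.ModEq.mul_right _ (fmod_modEq _ m)
        _ = useq arr m c0 t * (arr.take (arr.length - t)).prod := by
            rw [h1, hsplit]; ring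
    exact step.trans (ih (by omega))

-- ===== VERDICT (by name: the statement is the Claim_ definition above) =====
theorem mod_inverse_arr_spec : Claim_equal_mod_inverse_arr := by
  unfold Claim_equal_mod_inverse_arr
  intro arr m _ hpre
  obtain ⟨hne, hm0, hgcd⟩ := hpre
  have hn : 0 < arr.length := List.length_pos_iff.mpr hne
  unfold Spec_mod_inverse_arr mod_inverse_arr mod_inverse_arr_alt
  simp only []
  rw [PySem.List.pyRange_zero_natCast arr.length]
  rw [loop1_eq arr m arr.length le_rfl]
  have hinv1 : (List.range arr.length).map (fun j => if j < arr.length then cseq arr m j else 0)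
      = (List.range arr.length).map (cseq arr m ·) :=
    List.map_congr_left (fun j hj => if_pos (List.mem_range.mp hj))
  rw [hinv1]
  have hlen1 : ((List.range arr.length).map (cseq arr m ·)).length = arr.length := by simp
  rw [pyGetD_neg_one _ 0 (by simpa [hlen1] using hn),
      pyGetD_neg_one arr 0 hn]
  have hget1 : ((List.range arr.length).map (cseq arr m ·))[((List.range arr.length).map (cseq arr m ·)).length - 1]'(by omega)
      = cseq arr m (arr.length - 1) := by
    simp only [List.getElem_map, List.getElem_range, List.length_map, List.length_range]
  rw [hget1]
  -- the argument pow is called on, congruent to the product of the whole list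
  set c0 := pyInvMod (cseq arr m (arr.length - 1) * arr[arr.length - 1]'(by omega)) m with hc0
  have hbase : cseq arr m (arr.length - 1) * arr[arr.length - 1]'(by omega) ≡ arr.prod [ZMOD m] := by
    have h1 := (cseq_modEq arr m (arr.length - 1) (by omega)).mul_right
      (arr[arr.length - 1]'(by omega))
    have h2 := List.prod_take_succ arr (arr.length - 1) (by omega)
    have he : arr.length - 1 + 1 = arr.length := by omega
    rw [he, List.take_length] at h2
    exact h2 ▸ h1
  have hprodgcd : Int.gcd arr.prod m = 1 := coprime_prod arr hgcd
  have hbasegcd : Int.gcd (cseq arr m (arr.length - 1) * arr[arr.length - 1]'(by omega)) m = 1 := by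
    rw [gcd_congr hbase]; exact hprodgcd
  have hc0inv : c0 * arr.prod ≡ 1 [ZMOD m] := by
    calc c0 * arr.prod
        ≡ Int.gcdA (cseq arr m (arr.length - 1) * arr[arr.length - 1]'(by omega)) m
            * (cseq arr m (arr.length - 1) * arr[arr.length - 1]'(by omega)) [ZMOD m] :=
          (fmod_modEq _ m).mul (hbase.symm)
      _ = (cseq arr m (arr.length - 1) * arr[arr.length - 1]'(by omega))
            * Int.gcdA (cseq arr m (arr.length - 1) * arr[arr.length - 1]'(by omega)) m := by ring
      _ ≡ 1 [ZMOD m] := bezout_inv hbasegcd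
  -- second loop
  have hrange2 : PySem.List.pyRange ((arr.length : Int) - 1) (-1) (-1)
      = (List.range arr.length).map (fun (k : Nat) => ((arr.length : Int) - 1 - k)) := by
    rw [PySem.List.pyRange_neg_one]
    congr 1
    have : ((arr.length : Int) - 1 - (-1)) = (arr.length : Int) := by ring
    rw [this, Int.toNat_natCast]
  rw [hrange2, loop2_eq arr m c0 arr.length le_rfl]
  -- elementwise comparison
  apply List.ext_getElem (by simp)
  intro j h1 h2
  have hj : j < arr.length := by simpa using h2
  simp only [List.getElem_map, List.getElem_range]
  rw [if_pos (by omega)]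
  -- both sides are Python-reduced representatives of the inverse of arr[j]
  show PySem.Int.mod (useq arr m c0 (arr.length - 1 - j) * cseq arr m j) m
      = pyInvMod (arr[j]'hj) m
  unfold pyInvMod
  apply fmod_congr
  have hgj : Int.gcd (arr[j]'hj) m = 1 := hgcd _ (List.getElem_mem hj)
  apply modeq_cancel hgj
  have hu := useq_inv arr m c0 hc0inv (arr.length - 1 - j) (by omega)
  have hnt : arr.length - (arr.length - 1 - j) = j + 1 := by omega
  rw [hnt] at hu
  have hPj := cseq_modEq arr m j (by omega)
  have hsucc := List.prod_take_succ arr j hj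
  calc arr[j]'hj * (useq arr m c0 (arr.length - 1 - j) * cseq arr m j)
      ≡ arr[j]'hj * (useq arr m c0 (arr.length - 1 - j) * (arr.take j).prod) [ZMOD m] :=
        (hPj.mul_left _).mul_left _
    _ = useq arr m c0 (arr.length - 1 - j) * (arr.take (j+1)).prod := by rw [hsucc]; ring
    _ ≡ 1 [ZMOD m] := hu
    _ ≡ arr[j]'hj * Int.gcdA (arr[j]'hj) m [ZMOD m] := (bezout_inv hgj).symm
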